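-- pv_equiv track=rewrite | github.com/ZCheerZ/Reinforcement-learning | Prediction/task_counts.py | calculate_task_counts_by_type
-- ===== SOURCE A (Python) =====
-- from collections import defaultdict, deque
-- from collections import deque, defaultdict
--
-- def calculate_task_counts_by_type(task_sequence, task_durations):
--     """
--     计算每个时刻每种任务类型正在处理的任务数
--
--     参数:
--         task_sequence: 任务序列，每个元素为任务类型
--         task_durations: 字典，key为任务类型，value为执行时间
--
--     返回:
--         counts: 二维数组，维度为[任务类型数 × 序列长度]
--         type_order: 任务类型顺序，与counts的行索引对应
--     """
--     T = len(task_sequence)  # 周期总时长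
--
--     # 获取所有任务类型（按排序顺序）
--     all_types = sorted(task_durations.keys())
--     type_index = {type_name: idx for idx, type_name in enumerate(all_types)}
--
--     # 为每种任务类型创建队列（存储结束时间）
--     queues = {type_name: deque() for type_name in all_types}
--
--     # 初始化结果数组（任务类型数 × 序列长度）
--     counts = [[0] * T for _ in range(len(all_types))]
--
--     # 遍历每个时刻
--     for t, task_type in enumerate(task_sequence):
--         # 步骤1：处理所有类型的任务结束（在当前时刻t结束的任务）
--         for type_name in all_types:
--             queue = queues[type_name]
--             # 移除所有在当前时刻结束的任务
--             while queue and queue[0] == t: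
--                 queue.popleft()
--
--         # 步骤2：处理新到达的任务
--         duration = task_durations[task_type]
--         if duration > 0:  # 只处理执行时间大于0的任务
--             end_time = t + duration
--             queues[task_type].append(end_time)
--
--         # 步骤3：记录当前时刻所有类型的任务数
--         for type_name in all_types:
--             type_idx = type_index[type_name]
--             counts[type_idx][t] = len(queues[type_name])
--
--     return counts, all_types
-- ===== SOURCE B (Python) =====
-- def calculate_task_counts_by_type(task_sequence, task_durations):
--     # Direct closed-form count: at time t, type ty has as many active tasks as
--     # starts s <= t of type ty that are still running (duration > t - s).
--     T = len(task_sequence)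
--     all_types = sorted(task_durations.keys())
--     durations = [task_durations[x] for x in task_sequence]
--     counts = [[sum(1 for s in range(t + 1)
--                    if task_sequence[s] == ty and durations[s] > t - s)
--                for t in range(T)]
--               for ty in all_types]
--     return counts, all_types
-- ===== Notes on version B (the rewrite author's own statement) =====
-- stated objective: simpler
-- what changed: Replaced A's per-timestep simulation with one deque of end times per type (popleft on expiry, append on arrival, length snapshots into a preallocated matrix) by a direct closed-form count: each (type, time) cell is computed independently as the number of starts s <= t of that type still running (duration > t - s), so no queues, no index dict and no mutable matrix are needed.
import Mathlib
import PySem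

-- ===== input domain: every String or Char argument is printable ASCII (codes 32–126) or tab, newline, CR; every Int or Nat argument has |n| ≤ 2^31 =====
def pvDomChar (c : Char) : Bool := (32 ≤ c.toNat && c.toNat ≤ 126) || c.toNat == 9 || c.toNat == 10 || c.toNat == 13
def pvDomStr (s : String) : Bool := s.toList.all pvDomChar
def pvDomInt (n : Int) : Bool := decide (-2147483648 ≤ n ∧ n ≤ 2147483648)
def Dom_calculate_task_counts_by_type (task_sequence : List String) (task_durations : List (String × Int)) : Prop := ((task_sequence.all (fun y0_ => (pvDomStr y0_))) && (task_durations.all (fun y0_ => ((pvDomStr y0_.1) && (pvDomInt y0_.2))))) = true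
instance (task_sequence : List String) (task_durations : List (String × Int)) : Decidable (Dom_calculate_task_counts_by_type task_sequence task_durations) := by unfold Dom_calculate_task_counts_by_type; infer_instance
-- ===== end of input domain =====

-- B replaces A's deque simulation by a direct closed-form count per (type, time) cell (objective: simpler).


-- ===== PORT A =====
-- `while queue and queue[0] == t: queue.popleft()`
def pvPopFront (q : List Int) (t : Int) : List Int :=
  match q with
  | [] => []
  | e :: rest => if e = t then pvPopFront rest t else e :: rest

-- body of `for t, task_type in enumerate(task_sequence)`
def pvStepA (durs : PySem.Dict String Int) (all_types : List String)
    (type_index : PySem.Dict String Int)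
    (st : PySem.Dict String (List Int) × List (List Int)) :
    Int × String → PySem.Dict String (List Int) × List (List Int)
  | (t, task_type) =>
    -- step 1: remove tasks ending at time t from every type's queue
    let queues := all_types.foldl (fun qs ty => qs.modify ty [] (fun q => pvPopFront q t)) st.1
    -- step 2: enqueue the newly arrived task's end time (duration > 0 only);
    -- task_durations[task_type] (KeyError excluded by Pre_)
    let duration := durs.getD task_type 0
    let queues :=
      if duration > 0 then queues.modify task_type [] (fun q => q ++ [t + duration]) else queues
    -- step 3: counts[type_index[ty]][t] = len(queues[ty])  (indices in range by construction)
    let counts := all_types.foldl (fun cs ty =>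
      let idx := type_index.getD ty 0
      PySem.List.pySetD cs idx
        (PySem.List.pySetD (PySem.List.pyGetD cs idx []) t
          ((queues.getD ty []).length : Int))) st.2
    (queues, counts)

def calculate_task_counts_by_type (task_sequence : List String) (task_durations : List (String × Int)) : List (List Int) × List String :=
  let T := task_sequence.length
  let durs := PySem.Dict.ofList task_durations
  let all_types := PySem.List.sorted durs.keys (fun x => x) false
  let type_index := (PySem.List.enumerate all_types).foldl
    (fun d p => d.insert p.2 p.1) PySem.Dict.empty
  let queues := all_types.foldl
    (fun d ty => d.insert ty ([] : List Int)) PySem.Dict.empty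
  let counts := (List.range all_types.length).map (fun _ => List.replicate T (0 : Int))
  let res := (PySem.List.enumerate task_sequence).foldl
    (pvStepA durs all_types type_index) (queues, counts)
  (res.2, all_types)

-- ===== PORT B =====
def calculate_task_counts_by_type_alt (task_sequence : List String) (task_durations : List (String × Int)) : List (List Int) × List String :=
  let T := task_sequence.length
  let durs := PySem.Dict.ofList task_durations
  let all_types := PySem.List.sorted durs.keys (fun x => x) false
  -- task_durations[x] (KeyError excluded by Pre_)
  let durations := task_sequence.map (fun x => durs.getD x 0)
  let counts := all_types.map (fun ty =>
    (List.range T).map (fun t =>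
      (List.range (t + 1)).foldl (fun (acc : Int) (s : Nat) =>
        if PySem.List.pyGetD task_sequence (s : Int) "" = ty ∧
           PySem.List.pyGetD durations (s : Int) 0 > (t : Int) - (s : Int)
        then acc + 1 else acc) (0 : Int)))
  (counts, all_types)

-- ===== PRECONDITION & SPEC =====
-- Pre_ excludes exactly the inputs where A raises KeyError: some sequence element is not a key of task_durations.
def Pre_calculate_task_counts_by_type (task_sequence : List String) (task_durations : List (String × Int)) : Prop :=
  ∀ x ∈ task_sequence, (PySem.Dict.ofList task_durations).contains x = true
instance (task_sequence : List String) (task_durations : List (String × Int)) : Decidable (Pre_calculate_task_counts_by_type task_sequence task_durations) := by unfold Pre_calculate_task_counts_by_type; infer_instance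

def pvWitness_calculate_task_counts_by_type : List String × (List (String × Int)) :=
  (["a", "b", "a"], [("a", 2), ("b", 1)])

def Spec_calculate_task_counts_by_type (task_sequence : List String) (task_durations : List (String × Int)) (out : List (List Int) × List String) : Prop := out = calculate_task_counts_by_type_alt task_sequence task_durations
instance (task_sequence : List String) (task_durations : List (String × Int)) (out : List (List Int) × List String) : Decidable (Spec_calculate_task_counts_by_type task_sequence task_durations out) := by unfold Spec_calculate_task_counts_by_type; infer_instance

-- ===== CLAIM (what is proved, stated in full; the proofs are below) =====
def Claim_equal_calculate_task_counts_by_type : Prop := ∀ (task_sequence : List String) (task_durations : List (String × Int)), Dom_calculate_task_counts_by_type task_sequence task_durations → Pre_calculate_task_counts_by_type task_sequence task_durations → Spec_calculate_task_counts_by_type task_sequence task_durations (calculate_task_counts_by_type task_sequence task_durations)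


-- ===== LEMMAS AND PROOFS =====

-- duration looked up with default 0 (equals the dict value on keys; 0 off-keys)
def pvD (durs : PySem.Dict String Int) (ty : String) : Int := durs.getD ty 0

-- "start s is of type ty and still active just before time n (ends at s + duration ≥ n)"
def pvCond (seq : List String) (durs : PySem.Dict String Int) (ty : String) (n : Nat) (s : Nat) : Bool :=
  decide (seq.getD s "" = ty ∧ (n : Int) ≤ (s : Int) + pvD durs ty)

-- queue contents of type ty after n loop iterations: end times of still-active starts
def pvQF (seq : List String) (durs : PySem.Dict String Int) (ty : String) (n : Nat) : List Int :=
  ((List.range n).filter (pvCond seq durs ty n)).map (fun (s : Nat) => (s : Int) + pvD durs ty)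

-- the count recorded at column t
def pvN (seq : List String) (durs : PySem.Dict String Int) (ty : String) (t : Nat) : Int :=
  ((List.range (t + 1)).countP (pvCond seq durs ty (t + 1)) : Int)

-- counts row of type ty after n loop iterations
def pvRow (seq : List String) (durs : PySem.Dict String Int) (ty : String) (n : Nat) : List Int :=
  (List.range seq.length).map (fun t => if t < n then pvN seq durs ty t else 0)

def pvInv (seq : List String) (durs : PySem.Dict String Int) (L : List String) (n : Nat)
    (st : PySem.Dict String (List Int) × List (List Int)) : Prop :=
  (∀ ty, st.1.getD ty [] = pvQF seq durs ty n) ∧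
  st.2 = L.map (fun ty => pvRow seq durs ty n)

lemma pvPopFront_filter (q : List Int) (n : Int) (hs : q.Pairwise (· < ·)) (hge : ∀ e ∈ q, n ≤ e) :
    pvPopFront q n = q.filter (fun e => decide (n < e)) := by
  induction q with
  | nil => rfl
  | cons e rest ih =>
    rw [List.pairwise_cons] at hs
    by_cases he : e = n
    · subst he
      rw [pvPopFront, if_pos rfl, ih hs.2 (fun x hx => le_of_lt (hs.1 x hx)), List.filter_cons]
      simp
    · have h1 : n < e := lt_of_le_of_ne (hge e (by simp)) (Ne.symm he)
      rw [pvPopFront, if_neg he, List.filter_cons, if_pos (by simpa using h1),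
        List.filter_eq_self.mpr (fun x hx => by simpa using lt_trans h1 (hs.1 x hx))]

lemma pvQF_pairwise (seq : List String) (durs : PySem.Dict String Int) (ty : String) (n : Nat) :
    (pvQF seq durs ty n).Pairwise (· < ·) := by
  exact List.Pairwise.map _ (fun a b h => by omega)
    (List.Pairwise.sublist List.filter_sublist List.pairwise_lt_range)

lemma pvQF_ge (seq : List String) (durs : PySem.Dict String Int) (ty : String) (n : Nat) :
    ∀ e ∈ pvQF seq durs ty n, (n : Int) ≤ e := by
  intro e he
  simp only [pvQF, List.mem_map, List.mem_filter, pvCond, List.mem_range] at he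
  obtain ⟨s, ⟨_, hc⟩, rfl⟩ := he
  exact (of_decide_eq_true hc).2

lemma pvQF_pop (seq : List String) (durs : PySem.Dict String Int) (ty : String) (n : Nat) :
    pvPopFront (pvQF seq durs ty n) (n : Int) =
      ((List.range n).filter (pvCond seq durs ty (n + 1))).map (fun (s : Nat) => (s : Int) + pvD durs ty) := by
  rw [pvPopFront_filter _ _ (pvQF_pairwise seq durs ty n) (pvQF_ge seq durs ty n)]
  rw [pvQF, List.filter_map, List.filter_filter]
  congr 1
  apply List.filter_congr
  intro s hs
  simp only [List.mem_range] at hs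
  simp only [Function.comp, pvCond]
  by_cases hA : seq.getD s "" = ty <;> by_cases hB : (n : Int) < (s : Int) + pvD durs ty <;>
    simp [hA, hB] <;> omega

-- pvQF for a type with nonpositive duration (in particular any non-key) is empty
lemma pvQF_nonpos (seq : List String) (durs : PySem.Dict String Int) (ty : String) (n : Nat)
    (hd : pvD durs ty ≤ 0) : pvQF seq durs ty n = [] := by
  rw [pvQF, List.filter_eq_nil_iff.mpr, List.map_nil]
  intro s hs
  simp only [List.mem_range] at hs
  simp only [pvCond, decide_eq_true_eq, not_and]
  intro _
  omega

lemma getD_foldl_modify_list (f : String → List Int → List Int) (L : List String) (hnd : L.Nodup)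
    (qs : PySem.Dict String (List Int)) (ty : String) :
    (L.foldl (fun qs t => qs.modify t [] (f t)) qs).getD ty [] =
      if ty ∈ L then f ty (qs.getD ty []) else qs.getD ty [] := by
  induction L generalizing qs with
  | nil => simp
  | cons a rest ih =>
    rw [List.nodup_cons] at hnd
    rw [List.foldl_cons, ih hnd.2, PySem.Dict.getD_modify]
    by_cases h1 : ty ∈ rest
    · have hne : ty ≠ a := fun h => hnd.1 (h ▸ h1)
      simp [h1, hne]
    · by_cases h2 : ty = a
      · subst h2; simp [h1]
      · simp [h1, h2]

-- enumerate-insert loop skips keys it never inserts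
lemma getD_foldl_insert_enum_not_mem (rest : List String) (s : Int) (d : PySem.Dict String Int)
    (ty : String) (h : ty ∉ rest) :
    ((PySem.List.enumerate rest s).foldl (fun d p => d.insert p.2 p.1) d).getD ty 0 = d.getD ty 0 := by
  induction rest generalizing s d with
  | nil => rfl
  | cons a rest ih =>
    rw [List.mem_cons, not_or] at h
    rw [PySem.List.enumerate_cons, List.foldl_cons, ih _ _ h.2, PySem.Dict.getD_insert,
      if_neg h.1]

-- the type_index dict maps the i-th type to i
lemma tI_getD (L : List String) (hnd : L.Nodup) (s : Int) (d : PySem.Dict String Int)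
    (i : Nat) (h : i < L.length) :
    ((PySem.List.enumerate L s).foldl (fun d p => d.insert p.2 p.1) d).getD L[i] 0 = s + i := by
  induction L generalizing s d i with
  | nil => simp at h
  | cons a rest ih =>
    rw [List.nodup_cons] at hnd
    rw [PySem.List.enumerate_cons, List.foldl_cons]
    match i with
    | 0 =>
      simp only [List.getElem_cons_zero]
      rw [getD_foldl_insert_enum_not_mem rest _ _ a hnd.1, PySem.Dict.getD_insert, if_pos rfl]
      simp
    | (j + 1) =>
      simp only [List.getElem_cons_succ]
      rw [ih hnd.2 _ _ j (by simpa using h)]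
      push_cast
      ring

lemma getD_foldl_insert_nil (L : List String) (d : PySem.Dict String (List Int))
    (h : ∀ ty, d.getD ty [] = []) :
    ∀ ty, (L.foldl (fun d t => d.insert t ([] : List Int)) d).getD ty [] = [] := by
  induction L generalizing d with
  | nil => exact h
  | cons a rest ih =>
    rw [List.foldl_cons]
    refine ih _ (fun ty => ?_)
    rw [PySem.Dict.getD_insert]
    split
    · rfl
    · exact h ty

-- a list is the range-map of its own entries
lemma map_eq_map_range {β : Type} (L : List String) (f : String → β) :
    L.map f = (List.range L.length).map (fun i => f (L.getD i "")) := by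
  apply List.ext_getElem
  · simp
  · intro i h1 h2
    simp only [List.getElem_map, List.getElem_range]
    rw [List.getD_eq_getElem?_getD]
    simp only [List.length_map] at h1
    simp [List.getElem?_eq_getElem h1]

lemma pyGetD_map_range {β : Type} [Inhabited β] (m k : Nat) (p : Nat → β) (dflt : β) (h : k < m) :
    PySem.List.pyGetD ((List.range m).map p) (k : Int) dflt = p k := by
  rw [PySem.List.pyGetD_natCast]
  simp [List.getD_eq_getElem?_getD, h]

lemma pySetD_map_range {α : Type} (m k : Nat) (p : Nat → α) (v : α) (h : k < m) :
    PySem.List.pySetD ((List.range m).map p) (k : Int) v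
      = (List.range m).map (fun j => if j = k then v else p j) := by
  rw [PySem.List.pySetD, PySem.List.pySet?_natCast _ _ _ (by simpa using h), Option.getD_some]
  apply List.ext_getElem
  · simp
  · intro i h1 h2
    simp only [List.getElem_set, List.getElem_map, List.getElem_range]
    by_cases hik : k = i
    · subst hik; simp
    · rw [if_neg hik, if_neg (fun h => hik h.symm)]

-- one pass of the counts-writing fold over indices: every row i gets g i applied once
lemma foldl_setrow (m : Nat) (g : Nat → List Int → List Int) (old : Nat → List Int) :
    (List.range m).foldl
        (fun cs (i : Nat) => PySem.List.pySetD cs (i : Int)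
          (g i (PySem.List.pyGetD cs (i : Int) []))) ((List.range m).map old)
      = (List.range m).map (fun i => g i (old i)) := by
  suffices h : ∀ k, k ≤ m → (List.range k).foldl
      (fun cs (i : Nat) => PySem.List.pySetD cs (i : Int)
        (g i (PySem.List.pyGetD cs (i : Int) []))) ((List.range m).map old)
      = (List.range m).map (fun i => if i < k then g i (old i) else old i) by
    rw [h m le_rfl]
    apply List.map_congr_left
    intro i hi
    simp only [List.mem_range] at hi
    simp [hi]
  intro k hk
  induction k with
  | zero => simp
  | succ j ih =>
    rw [List.range_succ, List.foldl_append, ih (by omega), List.foldl_cons, List.foldl_nil]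
    have hj : j < m := by omega
    rw [pyGetD_map_range m j _ _ hj, if_neg (by omega), pySetD_map_range m j _ _ hj]
    apply List.map_congr_left
    intro i hi
    by_cases h1 : i = j
    · simp [h1]
    · by_cases h2 : i < j <;> simp [h1, h2] <;> omega

lemma pvRow_succ (seq : List String) (durs : PySem.Dict String Int) (ty : String) (n : Nat)
    (hn : n < seq.length) :
    PySem.List.pySetD (pvRow seq durs ty n) (n : Int) (pvN seq durs ty n)
      = pvRow seq durs ty (n + 1) := by
  rw [pvRow, pySetD_map_range _ _ _ _ hn, pvRow]
  apply List.map_congr_left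
  intro t ht
  by_cases h1 : t = n
  · simp [h1]
  · by_cases h2 : t < n <;> simp [h1, h2] <;> omega

lemma counts_fold (L : List String) (hnd : L.Nodup) (tI : PySem.Dict String Int)
    (htI : ∀ (i : Nat) (h : i < L.length), tI.getD L[i] 0 = (i : Int))
    (t : Int) (v : String → Int) (r r' : String → List Int)
    (hr : ∀ ty ∈ L, PySem.List.pySetD (r ty) t (v ty) = r' ty) :
    L.foldl (fun cs ty =>
        let idx := tI.getD ty 0
        PySem.List.pySetD cs idx
          (PySem.List.pySetD (PySem.List.pyGetD cs idx []) t (v ty))) (L.map r)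
      = L.map r' := by
  have hL : L = (List.range L.length).map (fun i => L.getD i "") := by
    simpa using map_eq_map_range L id
  have hgd : ∀ i, i < L.length → L.getD i "" ∈ L := by
    intro i hi
    rw [List.getD_eq_getElem?_getD, List.getElem?_eq_getElem hi]
    exact List.getElem_mem hi
  show L.foldl (fun cs ty => PySem.List.pySetD cs (tI.getD ty 0)
        (PySem.List.pySetD (PySem.List.pyGetD cs (tI.getD ty 0) []) t (v ty))) (L.map r)
      = L.map r'
  conv_lhs => rw [hL]
  rw [List.map_map, List.foldl_map]
  rw [PySem.List.foldl_congr_mem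
    (g := fun cs (i : Nat) => PySem.List.pySetD cs (i : Int)
      (PySem.List.pySetD (PySem.List.pyGetD cs (i : Int) []) t (v (L.getD i ""))))]
  · rw [show (fun cs (i : Nat) => PySem.List.pySetD cs (i : Int)
        (PySem.List.pySetD (PySem.List.pyGetD cs (i : Int) []) t (v (L.getD i ""))))
      = (fun cs (i : Nat) => PySem.List.pySetD cs (i : Int)
        ((fun (j : Nat) (row : List Int) => PySem.List.pySetD row t (v (L.getD j ""))) i
          (PySem.List.pyGetD cs (i : Int) []))) from rfl]
    rw [show (r ∘ fun i => L.getD i "") = (fun i => r (L.getD i "")) from rfl]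
    refine (foldl_setrow L.length
      (fun (j : Nat) (row : List Int) => PySem.List.pySetD row t (v (L.getD j "")))
      (fun i => r (L.getD i ""))).trans ?_
    conv_rhs => rw [hL, List.map_map]
    apply List.map_congr_left
    intro i hi
    simp only [List.mem_range] at hi
    simpa using hr _ (hgd i hi)
  · intro acc i hi
    simp only [List.mem_range] at hi
    have hLi : L.getD i "" = L[i] := by
      rw [List.getD_eq_getElem?_getD, List.getElem?_eq_getElem hi]; rfl
    simp only [hLi, htI i hi]

lemma pvStep_inv (seq : List String) (durs : PySem.Dict String Int) (L : List String)
    (tI : PySem.Dict String Int) (hnd : L.Nodup)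
    (htI : ∀ (i : Nat) (h : i < L.length), tI.getD L[i] 0 = (i : Int))
    (hmemL : ∀ ty, ty ∉ L → pvD durs ty ≤ 0)
    (n : Nat) (hn : n < seq.length) (hxL : seq[n] ∈ L)
    (st : PySem.Dict String (List Int) × List (List Int)) (hinv : pvInv seq durs L n st) :
    pvInv seq durs L (n + 1) (pvStepA durs L tI st ((n : Int), seq[n])) := by
  obtain ⟨hq, hc⟩ := hinv
  have hget : seq.getD n "" = seq[n] := by
    rw [List.getD_eq_getElem?_getD]; simp [List.getElem?_eq_getElem hn]
  -- queue contents after steps 1 and 2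
  have hq2 : ∀ ty,
      ((if durs.getD seq[n] 0 > 0
          then (L.foldl (fun qs t => qs.modify t [] (fun q => pvPopFront q (n : Int))) st.1).modify
                seq[n] [] (fun q => q ++ [(n : Int) + durs.getD seq[n] 0])
          else L.foldl (fun qs t => qs.modify t [] (fun q => pvPopFront q (n : Int))) st.1)).getD ty []
        = pvQF seq durs ty (n + 1) := by
    intro ty
    have hmid : (L.foldl (fun qs t => qs.modify t [] (fun q => pvPopFront q (n : Int))) st.1).getD ty []
        = ((List.range n).filter (pvCond seq durs ty (n + 1))).map (fun (s : Nat) => (s : Int) + pvD durs ty) := by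
      rw [getD_foldl_modify_list _ L hnd st.1 ty]
      by_cases hty : ty ∈ L
      · rw [if_pos hty, hq ty, pvQF_pop]
      · rw [if_neg hty, hq ty, pvQF_nonpos _ _ _ _ (hmemL ty hty)]
        rw [List.filter_eq_nil_iff.mpr, List.map_nil]
        intro s hs
        simp only [List.mem_range] at hs
        simp only [pvCond, decide_eq_true_eq, not_and]
        intro _
        have := hmemL ty hty
        omega
    have hsplit : pvQF seq durs ty (n + 1)
        = ((List.range n).filter (pvCond seq durs ty (n + 1))).map (fun (s : Nat) => (s : Int) + pvD durs ty)
          ++ (if pvCond seq durs ty (n + 1) n then [(n : Int) + pvD durs ty] else []) := by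
      rw [pvQF, List.range_succ, List.filter_append, List.map_append]
      congr 1
      rw [List.filter_cons]
      split <;> simp
    by_cases hty : ty = seq[n]
    · subst hty
      have hcnd : pvCond seq durs seq[n] (n + 1) n = decide (0 < pvD durs seq[n]) := by
        simp only [pvCond, hget, decide_eq_decide]
        constructor
        · rintro ⟨_, h2⟩; omega
        · intro h; exact ⟨by simp, by omega⟩
      by_cases hd : durs.getD seq[n] 0 > 0
      · rw [if_pos hd, PySem.Dict.getD_modify, if_pos rfl, hmid, hsplit, hcnd]
        rw [if_pos (by simpa [pvD] using hd)]
        rfl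
      · rw [if_neg hd, hmid, hsplit, hcnd, if_neg (by simpa [pvD] using hd), List.append_nil]
    · have hcnd : pvCond seq durs ty (n + 1) n = false := by
        simp only [pvCond, hget, decide_eq_false_iff_not, not_and]
        exact fun h1 _ => hty h1.symm
      rw [hsplit, hcnd, if_neg (Bool.false_ne_true), List.append_nil]
      by_cases hd : durs.getD seq[n] 0 > 0
      · rw [if_pos hd, PySem.Dict.getD_modify, if_neg hty, hmid]
      · rw [if_neg hd, hmid]
  constructor
  · intro ty
    simpa [pvStepA] using hq2 ty
  · dsimp only [pvStepA]
    rw [hc]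
    simp only [hq2]
    refine counts_fold L hnd tI htI (n : Int)
      (fun ty => ((pvQF seq durs ty (n + 1)).length : Int))
      (fun ty => pvRow seq durs ty n) (fun ty => pvRow seq durs ty (n + 1)) ?_
    intro ty _
    show PySem.List.pySetD (pvRow seq durs ty n) (n : Int)
        ((pvQF seq durs ty (n + 1)).length : Int) = pvRow seq durs ty (n + 1)
    have hlen : ((pvQF seq durs ty (n + 1)).length : Int) = pvN seq durs ty n := by
      rw [pvQF, List.length_map, pvN, List.countP_eq_length_filter]
    rw [hlen, pvRow_succ _ _ _ _ hn]

lemma pvLoop_inv (seq : List String) (durs : PySem.Dict String Int) (L : List String)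
    (tI : PySem.Dict String Int) (hnd : L.Nodup)
    (htI : ∀ (i : Nat) (h : i < L.length), tI.getD L[i] 0 = (i : Int))
    (hmemL : ∀ ty, ty ∉ L → pvD durs ty ≤ 0)
    (hpre : ∀ x ∈ seq, x ∈ L) :
    ∀ (l : List String) (k : Nat) (st : PySem.Dict String (List Int) × List (List Int)),
      seq.drop k = l → pvInv seq durs L k st →
      ((PySem.List.enumerate l (k : Int)).foldl (pvStepA durs L tI) st).2
        = L.map (fun ty => pvRow seq durs ty seq.length) := by
  intro l
  induction l with
  | nil =>
    intro k st hdrop hinv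
    have hk : seq.length ≤ k := by
      by_contra h
      rw [List.drop_eq_getElem_cons (by omega)] at hdrop
      exact List.cons_ne_nil _ _ hdrop
    simp only [PySem.List.enumerate, List.foldl_nil]
    rw [hinv.2]
    apply List.map_congr_left
    intro ty _
    rw [pvRow, pvRow]
    apply List.map_congr_left
    intro t ht
    simp only [List.mem_range] at ht
    simp [ht, (show t < k by omega)]
  | cons x rest ih =>
    intro k st hdrop hinv
    have hk : k < seq.length := by
      by_contra h
      rw [List.drop_eq_nil_of_le (by omega)] at hdrop
      exact List.cons_ne_nil _ _ hdrop.symm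
    have hcons := List.drop_eq_getElem_cons hk (l := seq)
    rw [hdrop] at hcons
    obtain ⟨hx, hrest⟩ : x = seq[k] ∧ rest = seq.drop (k + 1) := by
      injection hcons with h1 h2; exact ⟨h1, h2⟩
    rw [PySem.List.enumerate_cons, List.foldl_cons]
    have hstep := pvStep_inv seq durs L tI hnd htI hmemL k hk
      (hpre seq[k] (List.getElem_mem hk)) st hinv
    have := ih (k + 1) (pvStepA durs L tI st ((k : Int), seq[k])) hrest.symm hstep
    have hcast : ((k : Int) + 1) = ((k + 1 : Nat) : Int) := by push_cast; ring
    rw [hx, hcast, this]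

-- ===== VERDICT (by name: the statement is the Claim_ definition above) =====
theorem calculate_task_counts_by_type_spec : Claim_equal_calculate_task_counts_by_type := by
  intro seq tds _ hpre
  show calculate_task_counts_by_type seq tds = calculate_task_counts_by_type_alt seq tds
  simp only [calculate_task_counts_by_type, calculate_task_counts_by_type_alt]
  set durs := PySem.Dict.ofList tds with hdurs
  set L := PySem.List.sorted durs.keys (fun x => x) false with hLdef
  set tI := (PySem.List.enumerate L).foldl (fun d p => d.insert p.2 p.1) PySem.Dict.empty with htIdef
  have hnd : L.Nodup := (PySem.List.sorted_perm _ _ _).symm.nodup (PySem.Dict.nodup_keys_ofList tds)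
  have htI : ∀ (i : Nat) (h : i < L.length), tI.getD L[i] 0 = (i : Int) := by
    intro i hi
    rw [htIdef, tI_getD L hnd 0 PySem.Dict.empty i hi]
    simp
  have hmemL : ∀ ty, ty ∉ L → pvD durs ty ≤ 0 := by
    intro ty hty
    have hcf : durs.contains ty = false := by
      rw [← Bool.not_eq_true, PySem.Dict.contains_iff_mem_keys]
      intro hmem
      exact hty ((PySem.List.mem_sorted _ _ _ _).mpr hmem)
    rw [pvD, PySem.Dict.getD_of_not_contains _ _ hcf]
  have hpre' : ∀ x ∈ seq, x ∈ L := by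
    intro x hx
    exact (PySem.List.mem_sorted _ _ _ _).mpr ((PySem.Dict.contains_iff_mem_keys _ _).mp (hpre x hx))
  simp only [Prod.mk.injEq]
  refine ⟨?_, trivial⟩
  have hq0 : ∀ ty, (L.foldl (fun d ty => d.insert ty ([] : List Int)) PySem.Dict.empty).getD ty []
      = pvQF seq durs ty 0 := by
    intro ty
    rw [getD_foldl_insert_nil L PySem.Dict.empty (fun ty => PySem.Dict.getD_empty _ _)]
    simp [pvQF]
  have hc0 : (List.range L.length).map (fun _ => List.replicate seq.length (0 : Int))
      = L.map (fun ty => pvRow seq durs ty 0) := by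
    rw [map_eq_map_range L (fun ty => pvRow seq durs ty 0)]
    apply List.map_congr_left
    intro i _
    rw [pvRow]
    apply List.ext_getElem (by simp)
    intro t h1 h2
    simp
  have hfinal := pvLoop_inv seq durs L tI hnd htI hmemL hpre' seq 0
    (L.foldl (fun d ty => d.insert ty ([] : List Int)) PySem.Dict.empty,
     (List.range L.length).map (fun _ => List.replicate seq.length (0 : Int)))
    rfl ⟨hq0, hc0⟩
  push_cast at hfinal
  rw [hfinal]
  apply List.map_congr_left
  intro ty _
  rw [pvRow]
  apply List.map_congr_left
  intro t ht
  simp only [List.mem_range] at ht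
  rw [if_pos ht]
  -- B inner loop = pvN
  rw [show (fun (acc : Int) (s : Nat) =>
        if PySem.List.pyGetD seq (s : Int) "" = ty ∧
           PySem.List.pyGetD (seq.map (fun x => durs.getD x 0)) (s : Int) 0 > (t : Int) - (s : Int)
        then acc + 1 else acc)
      = (fun (acc : Int) (s : Nat) =>
        if (fun (s : Nat) => decide (PySem.List.pyGetD seq (s : Int) "" = ty ∧
            PySem.List.pyGetD (seq.map (fun x => durs.getD x 0)) (s : Int) 0 > (t : Int) - (s : Int))) s = true
        then acc + 1 else acc) from by
    funext acc s
    simp only [decide_eq_true_eq]]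
  rw [PySem.List.foldl_count_if, zero_add, pvN]
  congr 1
  apply List.countP_congr
  intro s hs
  simp only [List.mem_range] at hs
  have hsl : s < seq.length := by omega
  have hgetseq : seq.getD s "" = seq[s] := by
    rw [List.getD_eq_getElem?_getD, List.getElem?_eq_getElem hsl]
    rfl
  have hdl : PySem.List.pyGetD (seq.map (fun x => durs.getD x 0)) (s : Int) 0
      = durs.getD seq[s] 0 := by
    rw [PySem.List.pyGetD_natCast, List.getD_eq_getElem?_getD, List.getElem?_map,
      List.getElem?_eq_getElem hsl]
    rfl
  simp only [pvCond, pvD, PySem.List.pyGetD_natCast, hdl, hgetseq]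
  by_cases hA : seq[s] = ty
  · rw [← hA]
    simp
    omega
  · simp [hA]
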